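-- pv_equiv track=rewrite | github.com/hrx20000209/android_world | android_world/agents/explorer_agent.py | _task_wants_settings
-- ===== SOURCE A (Python) =====
-- def _task_wants_settings(goal_queries: list[str], runtime_queries: list[str]) -> bool:
--     merged = " ".join([*(goal_queries or []), *(runtime_queries or [])]).lower()
--     if not merged:
--         return False
--     tokens = {
--         "setting",
--         "settings",
--         "setup",
--         "configuration",
--         "config",
--         "sample rate",
--         "recording format",
--         "quality",
--         "bitrate",
--         "rename",
--         "name format",
--         "theme",
--     }
--     return any(token in merged for token in tokens)
-- ===== SOURCE B (Python) =====
-- import re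
--
-- _SETTINGS_KEYWORDS = (
--     "setting",
--     "settings",
--     "setup",
--     "configuration",
--     "config",
--     "sample rate",
--     "recording format",
--     "quality",
--     "bitrate",
--     "rename",
--     "name format",
--     "theme",
-- )
--
-- _SETTINGS_PATTERN = re.compile("|".join(map(re.escape, _SETTINGS_KEYWORDS)))
--
--
-- def _task_wants_settings(goal_queries: list[str], runtime_queries: list[str]) -> bool:
--     merged = " ".join([*(goal_queries or []), *(runtime_queries or [])]).lower()
--     return _SETTINGS_PATTERN.search(merged) is not None
-- ===== Notes on version B (the rewrite author's own statement) =====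
-- stated objective: idiomatic
-- what changed: Replaces the per-keyword `token in merged` membership loop (k independent substring scans) by one precompiled alternation regex searched once over the merged lowercased string; the empty-string guard is dropped since re.search over an empty string finds nothing.
import Mathlib
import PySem

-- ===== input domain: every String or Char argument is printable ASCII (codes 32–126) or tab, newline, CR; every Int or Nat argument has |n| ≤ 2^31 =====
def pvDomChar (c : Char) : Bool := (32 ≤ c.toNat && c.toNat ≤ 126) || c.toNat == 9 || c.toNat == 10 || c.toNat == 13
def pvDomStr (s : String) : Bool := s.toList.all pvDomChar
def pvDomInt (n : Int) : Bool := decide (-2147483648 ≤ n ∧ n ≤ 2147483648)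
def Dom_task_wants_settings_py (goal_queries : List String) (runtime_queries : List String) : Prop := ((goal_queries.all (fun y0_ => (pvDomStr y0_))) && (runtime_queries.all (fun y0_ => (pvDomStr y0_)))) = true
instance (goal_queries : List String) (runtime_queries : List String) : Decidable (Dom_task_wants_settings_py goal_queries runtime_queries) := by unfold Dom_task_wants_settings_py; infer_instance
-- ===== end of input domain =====

-- B replaces A's per-keyword `token in merged` membership loop by a single search
-- of a precompiled literal-alternation regex over the merged lowercased string
-- (objective: idiomatic; return value only, no side effects in either).

-- ===== PORT A =====
-- Python set literal of distinct string tokens → List String of its distinct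
-- elements; `any` over it is order-independent, so list order is immaterial.
def pvTokensA : List String :=
  ["setting", "settings", "setup", "configuration", "config", "sample rate",
   "recording format", "quality", "bitrate", "rename", "name format", "theme"]

def task_wants_settings_py (goal_queries : List String) (runtime_queries : List String) : Bool :=
  let merged := PySem.Str.lower (PySem.Str.join " " (goal_queries ++ runtime_queries))
  if merged = "" then false
  else pvTokensA.any (fun token => PySem.Str.isIn token merged)

-- ===== PORT B =====
-- the keyword tuple _SETTINGS_KEYWORDS, in its Python order
def pvTokensB : List String :=
  ["setting", "settings", "setup", "configuration", "config", "sample rate",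
   "recording format", "quality", "bitrate", "rename", "name format", "theme"]

-- Exact hand port of `re.search` for the compiled literal alternation
-- "setting|settings|…|theme": the engine tries each start position left to
-- right and, at each position, each alternative in pattern order, succeeding
-- on the first alternative matching literally (a prefix of the remaining text).
def pvReSearchLits (toks : List String) (cs : List Char) : Bool :=
  match cs with
  | [] => false
  | _ :: rest =>
    if toks.any (fun token => token.toList.isPrefixOf cs) then true
    else pvReSearchLits toks rest

def task_wants_settings_py_alt (goal_queries : List String) (runtime_queries : List String) : Bool :=
  let merged := PySem.Str.lower (PySem.Str.join " " (goal_queries ++ runtime_queries))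
  pvReSearchLits pvTokensB merged.toList

-- ===== PRECONDITION & SPEC =====
def Spec_task_wants_settings_py (goal_queries : List String) (runtime_queries : List String) (out : Bool) : Prop := out = task_wants_settings_py_alt goal_queries runtime_queries
instance (goal_queries : List String) (runtime_queries : List String) (out : Bool) : Decidable (Spec_task_wants_settings_py goal_queries runtime_queries out) := by unfold Spec_task_wants_settings_py; infer_instance

-- ===== CLAIM (what is proved, stated in full; the proofs are below) =====
def Claim_equal_task_wants_settings_py : Prop := ∀ (goal_queries : List String) (runtime_queries : List String), Dom_task_wants_settings_py goal_queries runtime_queries → Spec_task_wants_settings_py goal_queries runtime_queries (task_wants_settings_py goal_queries runtime_queries)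

-- ===== LEMMAS AND PROOFS =====

-- B's single regex pass finds a match iff some token is a substring (A's per-token test).
theorem pvReSearchLits_eq (cs : List Char) :
    pvReSearchLits pvTokensB cs = pvTokensB.any (fun t => PySem.Chars.isIn t.toList cs) := by
  induction cs with
  | nil => decide
  | cons c rest ih =>
    rw [pvReSearchLits]
    split_ifs with h
    · rw [eq_comm]
      simp only [List.any_eq_true] at h ⊢
      obtain ⟨t, ht, hpre⟩ := h
      exact ⟨t, ht, by
        rw [PySem.Chars.isIn_iff_infix]
        exact (List.isPrefixOf_iff_prefix.mp hpre).isInfix⟩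
    · rw [ih, eq_comm, Bool.eq_iff_iff]
      simp only [List.any_eq_true] at h ⊢
      constructor
      · rintro ⟨t, ht, hin⟩
        rw [PySem.Chars.isIn_iff_infix, List.infix_cons_iff] at hin
        rcases hin with hp | hi
        · exact absurd ⟨t, ht, List.isPrefixOf_iff_prefix.mpr hp⟩ h
        · exact ⟨t, ht, (PySem.Chars.isIn_iff_infix ..).mpr hi⟩
      · rintro ⟨t, ht, hin⟩
        refine ⟨t, ht, ?_⟩
        rw [PySem.Chars.isIn_iff_infix] at hin ⊢
        exact List.infix_cons hin

-- the two bodies agree for every merged string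
theorem pv_body_eq (m : String) :
    (if m = "" then false else pvTokensA.any (fun token => PySem.Str.isIn token m))
      = pvReSearchLits pvTokensB m.toList := by
  rw [pvReSearchLits_eq]
  by_cases h : m = ""
  · subst h; decide
  · simp only [h, if_false, pvTokensA, pvTokensB, PySem.Str.isIn_eq]

-- ===== VERDICT (by name: the statement is the Claim_ definition above) =====
theorem task_wants_settings_py_spec : Claim_equal_task_wants_settings_py := by
  intro g r _
  unfold Spec_task_wants_settings_py task_wants_settings_py task_wants_settings_py_alt
  exact pv_body_eq _
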